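-- pv_equiv track=rewrite | github.com/abiisnn/Natural-Language-Processing | Practice/3/stemming.py | initializeContext
-- ===== SOURCE A (Python) =====
-- def initializeContext(tokens, vocabulary):
-- 	contexto = {}
-- 	for word in vocabulary:
-- 		contexto[word] = []
--
-- 	for i in range(len(tokens)):
-- 		token = tokens[i]
-- 		if token in contexto:
-- 			contexto[token].append(i)
--
-- 	return contexto
-- ===== SOURCE B (Python) =====
-- def initializeContext(tokens, vocabulary):
-- 	return {word: [i for i in range(len(tokens)) if tokens[i] == word]
-- 	        for word in vocabulary}
-- ===== Notes on version B (the rewrite author's own statement) =====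
-- stated objective: alternative
-- what changed: B drops the shared position dictionary entirely: instead of one token pass with guarded appends into a pre-initialized dict, it is a dict comprehension over the vocabulary whose per-word value is a fresh scan of all token indices (O(V*T) per-word scans vs A's single indexed pass).
import Mathlib
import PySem

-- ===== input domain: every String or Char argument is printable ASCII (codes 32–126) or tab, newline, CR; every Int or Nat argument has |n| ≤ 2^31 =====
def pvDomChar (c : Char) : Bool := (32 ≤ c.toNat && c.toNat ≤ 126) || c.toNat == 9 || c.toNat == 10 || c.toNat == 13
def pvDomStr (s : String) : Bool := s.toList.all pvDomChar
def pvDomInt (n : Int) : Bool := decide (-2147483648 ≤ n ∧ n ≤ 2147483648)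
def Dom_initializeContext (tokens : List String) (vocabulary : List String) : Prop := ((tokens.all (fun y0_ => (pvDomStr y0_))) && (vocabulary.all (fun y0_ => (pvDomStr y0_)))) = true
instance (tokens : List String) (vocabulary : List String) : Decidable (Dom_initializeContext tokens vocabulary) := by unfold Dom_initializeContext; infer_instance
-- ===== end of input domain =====

-- B drops A's shared position dictionary: it is a dict comprehension over the vocabulary whose
-- per-word value is a fresh scan of all token indices (alternative decomposition, not faster).

-- ===== PORT A =====
def initializeContext (tokens : List String) (vocabulary : List String) : List (String × List Int) :=
  -- contexto = {}; for word in vocabulary: contexto[word] = []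
  let contexto : PySem.Dict String (List Int) :=
    vocabulary.foldl (fun d word => d.insert word ([] : List Int)) PySem.Dict.empty
  -- for i in range(len(tokens)): token = tokens[i]; if token in contexto: contexto[token].append(i)
  let contexto :=
    (PySem.List.pyRange 0 (tokens.length : Int) 1).foldl
      (fun d i =>
        let token := PySem.List.pyGetD tokens i ""
        if d.contains token then d.modify token [] (fun l => l ++ [i]) else d)
      contexto
  contexto.items

-- ===== PORT B =====
def initializeContext_alt (tokens : List String) (vocabulary : List String) : List (String × List Int) :=
  -- {word: [i for i in range(len(tokens)) if tokens[i] == word] for word in vocabulary}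
  (vocabulary.foldl
    (fun r word =>
      r.insert word
        ((PySem.List.pyRange 0 (tokens.length : Int) 1).filter
          (fun i => PySem.List.pyGetD tokens i "" == word)))
    PySem.Dict.empty).items

-- ===== PRECONDITION & SPEC =====
def Spec_initializeContext (tokens : List String) (vocabulary : List String) (out : List (String × List Int)) : Prop := out = initializeContext_alt tokens vocabulary
instance (tokens : List String) (vocabulary : List String) (out : List (String × List Int)) : Decidable (Spec_initializeContext tokens vocabulary out) := by unfold Spec_initializeContext; infer_instance

-- ===== CLAIM (what is proved, stated in full; the proofs are below) =====
def Claim_equal_initializeContext : Prop := ∀ (tokens : List String) (vocabulary : List String), Dom_initializeContext tokens vocabulary → Spec_initializeContext tokens vocabulary (initializeContext tokens vocabulary)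

-- ===== LEMMAS AND PROOFS =====

-- values of A's init dict are all []
lemma getD_init_nil (l : List String) (d : PySem.Dict String (List Int))
    (h : ∀ k, d.getD k [] = []) (k : String) :
    (l.foldl (fun d w => d.insert w ([] : List Int)) d).getD k [] = [] := by
  induction l generalizing d with
  | nil => exact h k
  | cons w l ih =>
      simp only [List.foldl_cons]
      refine ih _ (fun k => ?_)
      rw [PySem.Dict.getD_insert]
      split <;> simp [h]

-- keys are preserved by A's guarded loop
lemma keys_guarded (L : List (String × Int)) (d : PySem.Dict String (List Int)) :
    (L.foldl (fun d p => if d.contains p.1 then d.modify p.1 [] (fun l => l ++ [p.2]) else d) d).keys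
      = d.keys := by
  induction L generalizing d with
  | nil => rfl
  | cons p L ih =>
      simp only [List.foldl_cons]
      by_cases hc : d.contains p.1
      · rw [if_pos hc, ih]
        exact PySem.Dict.keys_insert_of_contains d _ hc
      · rw [if_neg hc, ih]

-- A's guarded append loop, per key already present
lemma getD_guarded (L : List (String × Int)) (d : PySem.Dict String (List Int))
    (k : String) (hk : d.contains k = true) :
    (L.foldl (fun d p => if d.contains p.1 then d.modify p.1 [] (fun l => l ++ [p.2]) else d) d).getD k []
      = d.getD k [] ++ (L.filter (fun p => p.1 == k)).map (·.2) := by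
  induction L generalizing d with
  | nil => simp
  | cons p L ih =>
      simp only [List.foldl_cons]
      by_cases hc : d.contains p.1
      · rw [if_pos hc]
        have hk' : (d.modify p.1 [] (fun l => l ++ [p.2])).contains k = true := by
          rw [PySem.Dict.contains_modify]; simp [hk]
        rw [ih _ hk', PySem.Dict.getD_modify]
        by_cases he : k = p.1
        · subst he; simp
        · rw [if_neg he]
          have : (p.1 == k) = false := by simpa using fun h => he h.symm
          simp [this]
      · rw [if_neg hc]
        have he : (p.1 == k) = false := by
          by_contra h
          simp only [Bool.not_eq_false, beq_iff_eq] at h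
          exact absurd (h ▸ hk) (by simp [hc])
        rw [ih _ hk]
        simp [he]

-- B's fold: last insert wins, value depends only on the key
lemma getD_project (l : List String) (v : String → List Int)
    (d : PySem.Dict String (List Int)) (k : String) :
    (l.foldl (fun r w => r.insert w (v w)) d).getD k []
      = if k ∈ l then v k else d.getD k [] := by
  induction l generalizing d with
  | nil => simp
  | cons w l ih =>
      simp only [List.foldl_cons, ih, PySem.Dict.getD_insert, List.mem_cons]
      by_cases hl : k ∈ l
      · simp [hl]
      · by_cases he : k = w
        · subst he; simp [hl]
        · simp [hl, he]

lemma mem_set_update_nil (l : List String) (k : String) :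
    k ∈ PySem.Set.update [] l ↔ k ∈ l := by
  rw [PySem.Set.mem_update]; simp

-- filter-then-project on the (token, index) pairing equals a direct index filter
lemma filter_pair_snd (l : List Int) (t : Int → String) (k : String) :
    ((l.map (fun i => (t i, i))).filter (fun p => p.1 == k)).map (·.2)
      = l.filter (fun i => t i == k) := by
  induction l with
  | nil => rfl
  | cons i l ih =>
      simp only [List.map_cons, List.filter_cons]
      by_cases h : (t i == k) = true
      · simp [h, ih]
      · simp only [Bool.not_eq_true] at h
        simp [h, ih]

-- ===== VERDICT (by name: the statement is the Claim_ definition above) =====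
theorem initializeContext_spec : Claim_equal_initializeContext := by
  intro tokens vocabulary _
  unfold Spec_initializeContext initializeContext initializeContext_alt
  set L : List (String × Int) :=
    (PySem.List.pyRange 0 (tokens.length : Int) 1).map
      (fun i => (PySem.List.pyGetD tokens i "", i)) with hL
  have hfoldA :
      (PySem.List.pyRange 0 (tokens.length : Int) 1).foldl
        (fun d i =>
          let token := PySem.List.pyGetD tokens i ""
          if d.contains token then d.modify token [] (fun l => l ++ [i]) else d)
        (vocabulary.foldl (fun d word => d.insert word ([] : List Int)) PySem.Dict.empty)
      = L.foldl (fun d p => if d.contains p.1 then d.modify p.1 [] (fun l => l ++ [p.2]) else d)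
          (vocabulary.foldl (fun d word => d.insert word ([] : List Int)) PySem.Dict.empty) := by
    rw [hL, List.foldl_map]
  simp only [hfoldA]
  set f : String → List Int :=
    fun word => (PySem.List.pyRange 0 (tokens.length : Int) 1).filter
      (fun i => PySem.List.pyGetD tokens i "" == word) with hf
  set init : PySem.Dict String (List Int) :=
    vocabulary.foldl (fun d word => d.insert word ([] : List Int)) PySem.Dict.empty with hinit
  set dA := L.foldl (fun d p => if d.contains p.1 then d.modify p.1 [] (fun l => l ++ [p.2]) else d) init with hdA
  set res := vocabulary.foldl (fun r word => r.insert word (f word)) PySem.Dict.empty with hres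
  have hkinit : init.keys = PySem.Set.update ([] : List String) vocabulary := by
    rw [hinit]
    exact PySem.Dict.keys_foldl_insert vocabulary (fun _ _ => []) PySem.Dict.empty
  have hkA : dA.keys = init.keys := keys_guarded L init
  have hkres : res.keys = PySem.Set.update ([] : List String) vocabulary := by
    rw [hres]
    exact PySem.Dict.keys_foldl_insert vocabulary (fun _ w => f w) PySem.Dict.empty
  have hndinit : init.keys.Nodup := by
    rw [hinit]
    exact PySem.Dict.nodup_keys_foldl_insert vocabulary _ _ PySem.Dict.nodup_keys_empty
  have hndA : dA.keys.Nodup := hkA ▸ hndinit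
  have hndres : res.keys.Nodup := by
    rw [hres]
    exact PySem.Dict.nodup_keys_foldl_insert vocabulary _ _ PySem.Dict.nodup_keys_empty
  rw [PySem.Dict.items_eq_map_keys dA hndA [], PySem.Dict.items_eq_map_keys res hndres [],
      hkA, hkinit, hkres]
  refine List.map_congr_left (fun k hkmem => ?_)
  have hkv : k ∈ vocabulary := (mem_set_update_nil vocabulary k).mp hkmem
  have hcont : init.contains k = true := by
    rw [PySem.Dict.contains_iff_mem_keys, hkinit]
    exact (mem_set_update_nil vocabulary k).mpr hkv
  have hAk : dA.getD k [] = (L.filter (fun p => p.1 == k)).map (·.2) := by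
    rw [hdA, getD_guarded L init k hcont, getD_init_nil vocabulary PySem.Dict.empty (by simp) k]
    simp
  have hresk : res.getD k [] = f k := by
    rw [hres, getD_project vocabulary f PySem.Dict.empty k, if_pos hkv]
  rw [hAk, hresk, hL, filter_pair_snd, hf]
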